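-- pv_equiv track=rewrite | github.com/wZZ22Z/GE-2 | scripts/optimize_custom_schedule.py | partition_hotness
-- ===== SOURCE A (Python) =====
-- from typing import Iterable, List, Sequence, Tuple
--
-- def partition_hotness(bucket_matrix: Sequence[Sequence[int]]) -> List[int]:
--     num_partitions = len(bucket_matrix)
--     hotness: List[int] = []
--     for partition in range(num_partitions):
--         outgoing = sum(bucket_matrix[partition][other] for other in range(num_partitions))
--         incoming = sum(bucket_matrix[other][partition] for other in range(num_partitions))
--         hotness.append(outgoing + incoming - bucket_matrix[partition][partition])
--     return hotness
-- ===== SOURCE B (Python) =====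
-- from typing import List, Sequence
--
-- def partition_hotness(bucket_matrix: Sequence[Sequence[int]]) -> List[int]:
--     n = len(bucket_matrix)
--     hotness: List[int] = [-bucket_matrix[i][i] for i in range(n)]
--     for i in range(n):
--         for j in range(n):
--             v = bucket_matrix[i][j]
--             hotness[i] += v
--             hotness[j] += v
--     return hotness
-- ===== Notes on version B (the rewrite author's own statement) =====
-- stated objective: alternative
-- what changed: Replaces A's per-partition row-scan plus column-scan (each cell read twice via two generator sums) with a single scatter pass that reads each cell once and accumulates it into both its row's and its column's hotness, after initializing hotness[i] = -diagonal.
import Mathlib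
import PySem

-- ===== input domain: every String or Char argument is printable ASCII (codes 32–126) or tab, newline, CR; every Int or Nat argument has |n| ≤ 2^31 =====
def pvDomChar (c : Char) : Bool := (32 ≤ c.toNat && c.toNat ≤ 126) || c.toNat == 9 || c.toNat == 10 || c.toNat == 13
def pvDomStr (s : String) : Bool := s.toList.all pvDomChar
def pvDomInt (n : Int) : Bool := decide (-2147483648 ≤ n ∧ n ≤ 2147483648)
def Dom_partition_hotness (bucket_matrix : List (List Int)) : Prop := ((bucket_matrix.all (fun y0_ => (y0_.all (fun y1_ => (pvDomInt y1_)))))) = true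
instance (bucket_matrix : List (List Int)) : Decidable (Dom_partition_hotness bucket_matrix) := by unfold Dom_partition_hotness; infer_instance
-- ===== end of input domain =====

-- B replaces A's per-partition row-scan + column-scan (two reads of every cell) by a single
-- scatter pass that reads each cell once and adds it to both its row's and its column's hotness.

-- ===== PORT A =====
def partition_hotness (bucket_matrix : List (List Int)) : List Int :=
  let n : Int := (bucket_matrix.length : Int)
  (PySem.List.pyRange 0 n 1).foldl (fun hotness p =>
    let outgoing := (PySem.List.pyRange 0 n 1).foldl
      (fun s o => s + PySem.List.pyGetD (PySem.List.pyGetD bucket_matrix p []) o 0) 0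
    let incoming := (PySem.List.pyRange 0 n 1).foldl
      (fun s o => s + PySem.List.pyGetD (PySem.List.pyGetD bucket_matrix o []) p 0) 0
    hotness ++ [outgoing + incoming - PySem.List.pyGetD (PySem.List.pyGetD bucket_matrix p []) p 0]) []

-- ===== PORT B =====
def partition_hotness_alt (bucket_matrix : List (List Int)) : List Int :=
  let n : Int := (bucket_matrix.length : Int)
  let init := (PySem.List.pyRange 0 n 1).map
    (fun i => -(PySem.List.pyGetD (PySem.List.pyGetD bucket_matrix i []) i 0))
  (PySem.List.pyRange 0 n 1).foldl (fun hotness i =>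
    (PySem.List.pyRange 0 n 1).foldl (fun hotness j =>
      let v := PySem.List.pyGetD (PySem.List.pyGetD bucket_matrix i []) j 0
      let hotness := PySem.List.pySetD hotness i (PySem.List.pyGetD hotness i 0 + v)
      PySem.List.pySetD hotness j (PySem.List.pyGetD hotness j 0 + v)) hotness) init

-- ===== PRECONDITION & SPEC =====
-- Pre_ excludes exactly the ragged matrices on which Python A raises IndexError:
-- some row among the first len(bucket_matrix) rows is shorter than len(bucket_matrix).
def Pre_partition_hotness (bucket_matrix : List (List Int)) : Prop :=
  ∀ row ∈ bucket_matrix, bucket_matrix.length ≤ row.length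
instance (bucket_matrix : List (List Int)) : Decidable (Pre_partition_hotness bucket_matrix) := by
  unfold Pre_partition_hotness; infer_instance
def pvWitness_partition_hotness : List (List Int) := [[1, 2], [3, 4]]
def Spec_partition_hotness (bucket_matrix : List (List Int)) (out : List Int) : Prop := out = partition_hotness_alt bucket_matrix
instance (bucket_matrix : List (List Int)) (out : List Int) : Decidable (Spec_partition_hotness bucket_matrix out) := by unfold Spec_partition_hotness; infer_instance

-- ===== CLAIM (what is proved, stated in full; the proofs are below) =====
def Claim_equal_partition_hotness : Prop := ∀ (bucket_matrix : List (List Int)), Dom_partition_hotness bucket_matrix → Pre_partition_hotness bucket_matrix → Spec_partition_hotness bucket_matrix (partition_hotness bucket_matrix)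

-- ===== LEMMAS AND PROOFS =====

/-- Cell access shared by both closed forms: `bucket_matrix[i][j]` (total form). -/
def gM (m : List (List Int)) (i j : Nat) : Int := (m.getD i []).getD j 0

/-- The value both programs compute for partition `t`. -/
def hotF (m : List (List Int)) (t : Nat) : Int :=
  ((List.range m.length).map (fun j => gM m t j)).sum
    + ((List.range m.length).map (fun i => gM m i t)).sum - gM m t t

/-- One scatter update `hotness[p.1] += p.2` at Nat level. -/
def stepN (h : List Int) (p : Nat × Int) : List Int := h.set p.1 (h.getD p.1 0 + p.2)

lemma flatten_map_singleton {α β : Type} (l : List α) (f : α → β) :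
    (l.map (fun x => [f x])).flatten = l.map f := by
  induction l with
  | nil => simp
  | cons a l ih => simp [ih]

lemma portA_closed (m : List (List Int)) :
    partition_hotness m = (List.range m.length).map (fun t => hotF m t) := by
  simp [partition_hotness, PySem.List.pyRange_zero_nat, List.foldl_map,
    PySem.List.foldl_add, PySem.List.pyGetD_natCast, gM, hotF, flatten_map_singleton]

lemma portB_ops (m : List (List Int)) :
    partition_hotness_alt m =
      ((List.range m.length).flatMap (fun i => (List.range m.length).flatMap
          (fun j => [(i, gM m i j), (j, gM m i j)]))).foldl stepN
        ((List.range m.length).map (fun i => -gM m i i)) := by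
  simp [partition_hotness_alt, PySem.List.pyRange_zero_nat, List.foldl_map,
    PySem.List.pySetD_natCast, PySem.List.pyGetD_natCast, List.foldl_flatMap, stepN, gM,
    Function.comp_def]

lemma length_foldl_stepN (ops : List (Nat × Int)) (init : List Int) :
    (ops.foldl stepN init).length = init.length := by
  induction ops generalizing init with
  | nil => rfl
  | cons p ops ih => simp [List.foldl_cons, ih, stepN]

lemma foldl_stepN_getD (ops : List (Nat × Int)) (init : List Int) (t : Nat)
    (h : ∀ p ∈ ops, p.1 < init.length) :
    (ops.foldl stepN init).getD t 0 =
      init.getD t 0 + ((ops.filter (fun p => p.1 == t)).map Prod.snd).sum := by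
  induction ops generalizing init with
  | nil => simp
  | cons p ops ih =>
    have hp : p.1 < init.length := h p (by simp)
    have h' : ∀ q ∈ ops, q.1 < (stepN init p).length := by
      intro q hq; simpa [stepN] using h q (by simp [hq])
    rw [List.foldl_cons, ih (stepN init p) h']
    by_cases hpt : p.1 = t
    · subst hpt
      simp [stepN, List.getD, hp]
      ring
    · simp [stepN, List.getD, hpt]

lemma sum_map_filter_flatMap {α : Type} (l : List α) (g : α → List (Nat × Int))
    (P : Nat × Int → Bool) :
    (((l.flatMap g).filter P).map Prod.snd).sum
      = (l.map (fun a => (((g a).filter P).map Prod.snd).sum)).sum := by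
  induction l with
  | nil => simp
  | cons a l ih => simp [List.flatMap_cons, List.filter_append, ih]

lemma sum_map_eq_zero_of_ne (l : List Nat) (t : Nat) (f : Nat → Int) (h : t ∉ l) :
    (l.map (fun i => if i = t then f i else 0)).sum = 0 := by
  induction l with
  | nil => simp
  | cons a l ih =>
    simp only [List.mem_cons, not_or] at h
    simp [Ne.symm, h.1, ih h.2]

lemma sum_range_ite (n t : Nat) (h : t < n) (f : Nat → Int) :
    ((List.range n).map (fun i => if i = t then f i else 0)).sum = f t := by
  induction n with
  | zero => omega
  | succ n ih =>
    rw [List.range_succ]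
    by_cases ht : t = n
    · subst ht
      simp [sum_map_eq_zero_of_ne (List.range t) t f (by simp)]
    · have htn : t < n := by omega
      simp only [List.map_append, List.sum_append, ih htn, List.map_cons, List.map_nil,
        List.sum_cons, List.sum_nil]
      have : ¬ (n = t) := fun hh => ht hh.symm
      simp [this]

lemma pair_filter_sum (i j t : Nat) (v : Int) :
    (([(i, v), (j, v)].filter (fun p => p.1 == t)).map Prod.snd).sum
      = (if i = t then v else 0) + (if j = t then v else 0) := by
  by_cases hi : i = t <;> by_cases hj : j = t <;> simp [hi, hj]

-- ===== VERDICT (by name: the statement is the Claim_ definition above) =====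
theorem partition_hotness_spec : Claim_equal_partition_hotness := by
  intro m _ hpre
  unfold Spec_partition_hotness
  rw [portA_closed, portB_ops]
  have hops : ∀ p ∈ ((List.range m.length).flatMap (fun i => (List.range m.length).flatMap
      (fun j => [(i, gM m i j), (j, gM m i j)]))),
      p.1 < ((List.range m.length).map (fun i => -gM m i i)).length := by
    intro p hp
    simp only [List.mem_flatMap, List.mem_range, List.mem_cons] at hp
    obtain ⟨i, hi, j, hj, hij⟩ := hp
    rcases hij with h1 | h1 | h1 <;> simp_all
  refine List.ext_getElem ?_ ?_
  · simp [length_foldl_stepN]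
  · intro t h1 h2
    have htn : t < m.length := by simpa using h1
    have hlen : t < (((List.range m.length).flatMap (fun i => (List.range m.length).flatMap
        (fun j => [(i, gM m i j), (j, gM m i j)]))).foldl stepN
        ((List.range m.length).map (fun i => -gM m i i))).length := h2
    rw [← List.getD_eq_getElem _ 0 hlen, foldl_stepN_getD _ _ t hops]
    have hinit : ((List.range m.length).map (fun i => -gM m i i)).getD t 0 = -gM m t t := by
      simp [List.getD, htn]
    rw [hinit]
    rw [sum_map_filter_flatMap]
    simp only [sum_map_filter_flatMap, pair_filter_sum, List.sum_map_add]
    have e1 : ∀ i, ((List.range m.length).map (fun j =>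
        if i = t then gM m i j else 0)).sum = if i = t then ((List.range m.length).map
        (fun j => gM m i j)).sum else 0 := by
      intro i
      by_cases hi : i = t <;> simp [hi]
    have e2 : ∀ i, ((List.range m.length).map (fun j =>
        if j = t then gM m i j else 0)).sum = gM m i t :=
      fun i => sum_range_ite _ _ htn _
    simp only [e1, e2]
    rw [sum_range_ite _ _ htn (fun i => ((List.range m.length).map (fun j => gM m i j)).sum)]
    simp [hotF]
    ring
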